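-- pv_equiv track=rewrite | github.com/djedra/Test_development | TESTS/task1/duration/main.py | course_duration
-- ===== SOURCE A (Python) =====
-- def course_duration(courses: list, mentors: list, durations: list) -> str:
--     courses_list = []
--     for course, mentor, duration in zip(courses, mentors, durations):
--         course_dict = {"title": course, "mentors": mentor, "duration": duration}
--         courses_list.append(course_dict)
--
--     durations_dict = {}
--
--     for id, course in enumerate(courses_list):
--         key = course["duration"]
--         durations_dict.setdefault(key, [])
--         durations_dict[key].append(id)
--
--     durations_dict = dict(sorted(durations_dict.items()))
--
--     output_string = ''
--     for duration, id in durations_dict.items():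
--         for id1 in id:
--             output_string += f'{courses[id1]} - {duration} месяцев\n'
--
--     return output_string.strip()
-- ===== SOURCE B (Python) =====
-- def course_duration(courses: list, mentors: list, durations: list) -> str:
--     pairs = [(duration, course) for course, mentor, duration in zip(courses, mentors, durations)]
--     pairs.sort(key=lambda p: p[0])  # stable: equal durations keep input order
--     lines = [f'{course} - {duration} месяцев' for duration, course in pairs]
--     return '\n'.join(lines).strip()
-- ===== Notes on version B (the rewrite author's own statement) =====
-- stated objective: simpler
-- what changed: Replaces the triple-dict list, the group-by-duration dict (setdefault/append of ids, sorted keys, nested output loops) by one flat list of (duration, course) pairs stable-sorted on duration alone, then a single join.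
import Mathlib
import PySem

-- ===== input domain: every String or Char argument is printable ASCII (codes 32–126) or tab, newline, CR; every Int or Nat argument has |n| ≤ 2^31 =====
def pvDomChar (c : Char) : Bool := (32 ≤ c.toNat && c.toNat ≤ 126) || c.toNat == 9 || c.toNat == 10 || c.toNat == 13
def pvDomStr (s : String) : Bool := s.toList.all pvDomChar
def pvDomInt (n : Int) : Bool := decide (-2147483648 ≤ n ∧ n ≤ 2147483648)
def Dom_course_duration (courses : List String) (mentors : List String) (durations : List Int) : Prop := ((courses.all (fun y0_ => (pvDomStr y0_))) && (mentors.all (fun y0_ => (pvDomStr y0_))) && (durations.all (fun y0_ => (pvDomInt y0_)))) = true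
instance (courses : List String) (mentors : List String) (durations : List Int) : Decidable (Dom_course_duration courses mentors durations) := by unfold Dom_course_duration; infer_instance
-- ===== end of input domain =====

-- B replaces A's group-by-duration dict (ids per duration, sorted keys, nested output loops)
-- by a single stable sort of (duration, course) pairs followed by one join: simpler, same cost.

-- ===== PORT A =====
-- Python's three-key dict {"title": …, "mentors": …, "duration": …} with fixed string keys is
-- ported as the triple (title, mentors, duration); zip(courses, mentors, durations) is the
-- truncating List.zip, its (c, m, d) element being (c, (m, d)).
def course_duration (courses : List String) (mentors : List String) (durations : List Int) : String :=
  let courses_list : List (String × String × Int) :=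
    (courses.zip (mentors.zip durations)).foldl
      (fun acc t => acc ++ [(t.1, t.2.1, t.2.2)]) []
  -- `setdefault(key, []); durations_dict[key].append(id)` is exactly `modify key [] (· ++ [id])`
  let durations_dict : PySem.Dict Int (List Int) :=
    (PySem.List.enumerate courses_list).foldl
      (fun d p => d.modify p.2.2.2 [] (fun l => l ++ [p.1])) PySem.Dict.empty
  -- `sorted(durations_dict.items())` compares (key, value) tuples; dict keys are distinct, so
  -- the comparison is decided by the Int key alone.
  let sortedItems := PySem.List.sorted durations_dict.items (fun p => p.1) false
  -- `courses[id1]` always has id1 in range (id1 < len(zip) ≤ len(courses)), hence pyGetD;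
  -- the one f-string appended per iteration is the one grouped chunk below.
  let output : List Char := sortedItems.foldl (fun out p =>
      p.2.foldl (fun out id1 =>
        out ++ ((PySem.List.pyGetD courses id1 "").toList ++ (" - ").toList
                 ++ (PySem.Int.toStr p.1).toList ++ (" месяцев\n").toList)) out) []
  String.ofList (PySem.Chars.strip output)

-- ===== PORT B =====
def course_duration_alt (courses : List String) (mentors : List String) (durations : List Int) : String :=
  let pairs : List (Int × String) :=
    (courses.zip (mentors.zip durations)).map (fun t => (t.2.2, t.1))
  -- pairs.sort(key=lambda p: p[0]) — stable sort on the duration alone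
  let sortedPairs := PySem.List.sorted pairs (fun p => p.1) false
  let lines : List (List Char) :=
    sortedPairs.map (fun p => p.2.toList ++ (" - ").toList
                       ++ (PySem.Int.toStr p.1).toList ++ (" месяцев").toList)
  String.ofList (PySem.Chars.strip (PySem.Chars.join ['\n'] lines))

-- ===== PRECONDITION & SPEC =====
def Spec_course_duration (courses : List String) (mentors : List String) (durations : List Int) (out : String) : Prop := out = course_duration_alt courses mentors durations
instance (courses : List String) (mentors : List String) (durations : List Int) (out : String) : Decidable (Spec_course_duration courses mentors durations out) := by unfold Spec_course_duration; infer_instance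

-- ===== CLAIM (what is proved, stated in full; the proofs are below) =====
def Claim_equal_course_duration : Prop := ∀ (courses : List String) (mentors : List String) (durations : List Int), Dom_course_duration courses mentors durations → Spec_course_duration courses mentors durations (course_duration courses mentors durations)

-- ===== LEMMAS AND PROOFS =====

theorem pv_insertBy_nil {α : Type} (before : α → α → Bool) (x : α) :
    PySem.List.insertBy before x [] = [x] := rfl

theorem pv_insertBy_cons {α : Type} (before : α → α → Bool) (x y : α) (ys : List α) :
    PySem.List.insertBy before x (y :: ys) =
      if before x y then x :: y :: ys else y :: PySem.List.insertBy before x ys := rfl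

theorem pv_insertBy_all_before {α : Type} (before : α → α → Bool) (x : α) (l : List α)
    (h : ∀ y ∈ l, before x y = true) :
    PySem.List.insertBy before x l = x :: l := by
  cases l with
  | nil => rfl
  | cons y ys => rw [pv_insertBy_cons, h y (by simp)]; simp

theorem pv_insertBy_append_not {α : Type} (before : α → α → Bool) (x : α) (l1 l2 : List α)
    (h : ∀ y ∈ l1, before x y = false) :
    PySem.List.insertBy before x (l1 ++ l2) = l1 ++ PySem.List.insertBy before x l2 := by
  induction l1 with
  | nil => simp
  | cons y ys ih =>
      rw [List.cons_append, pv_insertBy_cons, h y (by simp)]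
      simp only [Bool.false_eq_true, if_false, List.cons_append, List.cons.injEq, true_and]
      exact ih (fun y hy => h y (by simp [hy]))

-- insertBy into a bucketed concatenation, new key case
theorem pv_insertBy_flatMap_new {α : Type} (key : α → Int) (x : α) (k : Int) (hx : key x = k)
    (K : List Int) (hK : K.Pairwise (· < ·)) (hkK : k ∉ K)
    (b : Int → List α) (hb : ∀ k' ∈ K, ∀ y ∈ b k', key y = k') :
    PySem.List.insertBy (fun a c => decide (key a < key c)) x (K.flatMap b) =
      (PySem.List.insertBy (fun a c => decide (a < c)) k K).flatMap
        (fun k' => if k' = k then [x] else b k') := by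
  induction K with
  | nil => simp [pv_insertBy_nil]
  | cons k0 K' ih =>
      have hk0K' : ∀ k' ∈ K', k0 < k' := (List.pairwise_cons.mp hK).1
      by_cases hlt : k < k0
      · have hall : ∀ y ∈ (k0 :: K').flatMap b, decide (key x < key y) = true := by
          intro y hy
          rcases List.mem_flatMap.mp hy with ⟨k', hk', hyk'⟩
          have := hb k' hk' y hyk'
          have hkk' : k < k' := by
            rcases List.mem_cons.mp hk' with h | h
            · omega
            · exact lt_trans hlt (hk0K' k' h)
          simp [hx, this, hkk']
        rw [pv_insertBy_all_before _ _ _ hall, pv_insertBy_cons]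
        have hcongr : List.flatMap (fun k' => if k' = k then [x] else b k') (k0 :: K')
            = List.flatMap b (k0 :: K') := by
          apply List.flatMap_congr
          intro k' hk'
          have hne : k' ≠ k := fun h => hkK (h ▸ hk')
          simp [hne]
        simp [hlt, hcongr]
      · have hk0k : k0 < k := by
          rcases lt_or_eq_of_le (not_lt.mp hlt) with h | h
          · exact h
          · exact absurd (h ▸ List.mem_cons_self) hkK  -- k = k0 contradicts k ∉ k0::K'
        have hskip : ∀ y ∈ b k0, (fun a c => decide (key a < key c)) x y = false := by
          intro y hy
          have := hb k0 List.mem_cons_self y hy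
          simp [hx, this]; omega
        simp only [List.flatMap_cons]
        rw [pv_insertBy_append_not _ _ _ _ hskip,
            ih (hK.sublist (List.sublist_cons_self k0 K'))
               (fun h => hkK (List.mem_cons_of_mem _ h))
               (fun k' hk' => hb k' (List.mem_cons_of_mem _ hk'))]
        rw [pv_insertBy_cons]
        have : ¬ k < k0 := hlt
        simp only [decide_eq_true_eq, if_neg this, List.flatMap_cons]
        have : k0 ≠ k := by omega
        rw [if_neg this]

-- insertBy into a bucketed concatenation, existing key case
theorem pv_insertBy_flatMap_mem {α : Type} (key : α → Int) (x : α) (k : Int) (hx : key x = k)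
    (K : List Int) (hK : K.Pairwise (· < ·)) (hkK : k ∈ K)
    (b : Int → List α) (hb : ∀ k' ∈ K, ∀ y ∈ b k', key y = k') :
    PySem.List.insertBy (fun a c => decide (key a < key c)) x (K.flatMap b) =
      K.flatMap (fun k' => if k' = k then b k' ++ [x] else b k') := by
  induction K with
  | nil => cases hkK
  | cons k0 K' ih =>
      have hk0K' : ∀ k' ∈ K', k0 < k' := (List.pairwise_cons.mp hK).1
      by_cases hk0 : k0 = k
      · subst hk0
        have hskip : ∀ y ∈ b k0, (fun a c => decide (key a < key c)) x y = false := by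
          intro y hy
          have := hb k0 List.mem_cons_self y hy
          simp [hx, this]
        have hall : ∀ y ∈ K'.flatMap b, decide (key x < key y) = true := by
          intro y hy
          rcases List.mem_flatMap.mp hy with ⟨k', hk', hyk'⟩
          have := hb k' (List.mem_cons_of_mem _ hk') y hyk'
          have := hk0K' k' hk'
          simp [hx]; omega
        simp only [List.flatMap_cons]
        rw [pv_insertBy_append_not _ _ _ _ hskip, pv_insertBy_all_before _ _ _ hall]
        have hcongr : List.flatMap (fun k' => if k' = k0 then b k' ++ [x] else b k') K'
            = List.flatMap b K' := by
          apply List.flatMap_congr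
          intro k' hk'
          have : k' ≠ k0 := by have := hk0K' k' hk'; omega
          simp [this]
        simp [hcongr]
      · have hkK' : k ∈ K' := by
          rcases List.mem_cons.mp hkK with h | h
          · exact absurd h.symm hk0
          · exact h
        have hk0k : k0 < k := hk0K' k hkK'
        have hskip : ∀ y ∈ b k0, (fun a c => decide (key a < key c)) x y = false := by
          intro y hy
          have := hb k0 List.mem_cons_self y hy
          simp [hx, this]; omega
        simp only [List.flatMap_cons]
        rw [pv_insertBy_append_not _ _ _ _ hskip,
            ih (hK.sublist (List.sublist_cons_self k0 K')) hkK'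
               (fun k' hk' => hb k' (List.mem_cons_of_mem _ hk'))]
        rw [if_neg hk0]

-- Python's stable sort is: the strictly increasing list of distinct keys, each key replaced
-- by its input-order bucket.
theorem pv_sorted_eq_flatMap_filter {α : Type} (xs : List α) (key : α → Int) :
    PySem.List.sorted xs key false =
      (PySem.List.sorted (PySem.List.dedup (xs.map key)) (fun k => k) false).flatMap
        (fun k => xs.filter (fun x => key x == k)) := by
  induction xs using List.reverseRecOn with
  | nil => simp [PySem.List.sorted]
  | append_singleton xs x ih =>
      have hsapp : ∀ {β : Type} (ys : List β) (y : β) (kf : β → Int),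
          PySem.List.sorted (ys ++ [y]) kf false =
            PySem.List.insertBy (fun a c => decide (kf a < kf c)) y
              (PySem.List.sorted ys kf false) := by
        intro β ys y kf
        rw [PySem.List.sorted_eq_foldl_insertBy, PySem.List.sorted_eq_foldl_insertBy,
            List.foldl_append]
        rfl
      have hKpair : (PySem.List.sorted (PySem.Set.ofList (xs.map key)) (fun k => k) false).Pairwise (· < ·) :=
        PySem.List.sorted_ofList_pairwise_lt (xs.map key)
      have hmemK : ∀ k', k' ∈ PySem.List.sorted (PySem.Set.ofList (xs.map key)) (fun k => k) false ↔ k' ∈ xs.map key := by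
        intro k'
        rw [PySem.List.mem_sorted, PySem.Set.mem_ofList]
      have hb : ∀ k' ∈ PySem.List.sorted (PySem.Set.ofList (xs.map key)) (fun k => k) false,
          ∀ y ∈ xs.filter (fun z => key z == k'), key y = k' := by
        intro k' _ y hy
        simpa using (List.mem_filter.mp hy).2
      rw [hsapp, ih]
      simp only [List.map_append, List.map_cons, List.map_nil, PySem.List.dedup_eq_ofList] at *
      rw [PySem.Set.ofList_append_singleton]
      by_cases hmem : key x ∈ xs.map key
      · rw [PySem.Set.add_of_mem (by rw [PySem.Set.mem_ofList]; exact hmem)]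
        rw [pv_insertBy_flatMap_mem key x (key x) rfl _ hKpair ((hmemK _).mpr hmem) _ hb]
        apply List.flatMap_congr
        intro k' _
        by_cases hk' : k' = key x
        · subst hk'
          simp
        · simp only [if_neg hk', List.filter_append, List.filter_cons, List.filter_nil]
          have : (key x == k') = false := by simp [Ne.symm hk']
          simp [this]
      · rw [PySem.Set.add_of_not_mem (by rw [PySem.Set.mem_ofList]; exact hmem)]
        rw [pv_insertBy_flatMap_new key x (key x) rfl _ hKpair
              (fun h => hmem ((hmemK _).mp h)) _ hb]
        rw [hsapp]
        apply List.flatMap_congr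
        intro k' hk'mem
        have hfilt : xs.filter (fun z => key z == key x) = [] := by
          apply List.filter_eq_nil_iff.mpr
          intro z hz hbeq
          exact hmem (by rw [← (by simpa using hbeq : key z = key x)]; exact List.mem_map_of_mem hz)
        by_cases hk' : k' = key x
        · subst hk'
          simp [hfilt]
        · have : (key x == k') = false := by simp [Ne.symm hk']
          simp [if_neg hk', List.filter_append, this]

theorem pv_enum_filter_map_snd {α : Type} (xs : List α) (s : Int) (q : α → Bool) :
    ((PySem.List.enumerate xs s).filter (fun p => q p.2)).map (fun p => p.2) = xs.filter q := by
  induction xs generalizing s with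
  | nil => simp [PySem.List.enumerate]
  | cons x t ih =>
      rw [PySem.List.enumerate_cons, List.filter_cons, List.filter_cons]
      by_cases hx : q x
      · simp only [hx, if_pos, List.map_cons]
        rw [ih]
      · simp only [hx, Bool.false_eq_true, if_false]
        rw [ih]

theorem pv_flatMap_newline (L : List (List Char)) (h : L ≠ []) :
    L.flatMap (fun l => l ++ ['\n']) = PySem.Chars.join ['\n'] L ++ ['\n'] := by
  induction L with
  | nil => exact absurd rfl h
  | cons l L' ih =>
      cases L' with
      | nil => simp [PySem.Chars.join_singleton]
      | cons l2 L'' =>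
          rw [List.flatMap_cons, ih (by simp), PySem.Chars.join_cons_cons]
          simp [List.append_assoc]

theorem pv_rstrip_append_newline (t : List Char) :
    PySem.Chars.rstrip (t ++ ['\n']) = PySem.Chars.rstrip t := by
  have hws : PySem.Chars.isspace '\n' = true := by decide
  simp [PySem.Chars.rstrip, List.reverse_append, hws]

theorem pv_strip_append_newline (s : List Char) :
    PySem.Chars.strip (s ++ ['\n']) = PySem.Chars.strip s := by
  have hws : PySem.Chars.isspace '\n' = true := by decide
  show PySem.Chars.rstrip (PySem.Chars.lstrip (s ++ ['\n'])) = PySem.Chars.rstrip (PySem.Chars.lstrip s)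
  simp only [PySem.Chars.lstrip, List.dropWhile_append]
  by_cases he : (List.dropWhile PySem.Chars.isspace s).isEmpty
  · simp [he, List.dropWhile, hws]
    simp [List.isEmpty_iff.mp he]
  · simp only [he, Bool.false_eq_true, if_false]
    exact pv_rstrip_append_newline _

-- ===== VERDICT (by name: the statement is the Claim_ definition above) =====
theorem course_duration_spec : Claim_equal_course_duration := by
  intro courses mentors durations _
  show course_duration courses mentors durations = course_duration_alt courses mentors durations
  unfold course_duration course_duration_alt
  dsimp only
  set zs := courses.zip (mentors.zip durations) with hzs
  have hlen : zs.length ≤ courses.length := by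
    rw [hzs, List.length_zip]; exact Nat.min_le_left _ _
  -- A's first loop is a map
  rw [PySem.List.foldl_append_singleton_eq_map (fun t => (t.1, t.2.1, t.2.2)) zs []]
  rw [List.nil_append]
  set cl := zs.map (fun t => (t.1, t.2.1, t.2.2)) with hcl
  set d := (PySem.List.enumerate cl).foldl
      (fun d p => d.modify p.2.2.2 [] (fun l => l ++ [p.1])) PySem.Dict.empty with hd
  -- the dict's keys, in first-occurrence order
  have hmapkey : (PySem.List.enumerate cl).map (fun p => p.2.2.2) = cl.map (fun t => t.2.2) := by
    conv_rhs => rw [← PySem.List.map_snd_enumerate cl 0]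
    rw [List.map_map]
    exact List.map_congr_left (fun p _ => rfl)
  have hkeys : d.keys = PySem.Set.ofList (cl.map (fun t => t.2.2)) := by
    rw [hd, PySem.Dict.keys_foldl_modify_key (PySem.List.enumerate cl) (fun p => p.2.2.2) []
          (fun _ p => fun l => l ++ [p.1]) PySem.Dict.empty]
    rw [hmapkey]
    simp [PySem.Dict.keys_empty, PySem.Set.update_nil_left]
  have hnodup : d.keys.Nodup := by
    rw [hd]
    exact PySem.Dict.nodup_keys_foldl_modify_key _
      (fun (p : Int × (String × String × Int)) => p.2.2.2) []
      (fun _ p => fun l => l ++ [p.1]) PySem.Dict.empty (by simp [PySem.Dict.keys_empty])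
  have hgetD : ∀ k, d.getD k [] =
      ((PySem.List.enumerate cl).filter (fun p => p.2.2.2 == k)).map (fun p => p.1) := by
    intro k
    have hfold : d = ((PySem.List.enumerate cl).map
        (fun (p : Int × (String × String × Int)) => (p.2.2.2, p.1))).foldl
        (fun d q => d.modify q.1 [] (fun v => v ++ [q.2])) PySem.Dict.empty := by
      rw [hd, List.foldl_map]
    rw [hfold, PySem.Dict.getD_foldl_modify_append, PySem.Dict.getD_empty, List.nil_append,
        List.filter_map, List.map_map]
    rfl
  have hitems : d.items = (PySem.Set.ofList (cl.map (fun t => t.2.2))).map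
      (fun k => (k, ((PySem.List.enumerate cl).filter (fun p => p.2.2.2 == k)).map (fun p => p.1))) := by
    rw [PySem.Dict.items_eq_map_keys d hnodup [], hkeys]
    exact List.map_congr_left (fun k _ => by rw [hgetD k])
  set KS := PySem.List.sorted (PySem.Set.ofList (cl.map (fun t => t.2.2))) (fun k => k) false with hKS
  have hsorteditems : PySem.List.sorted d.items (fun p => p.1) false =
      KS.map (fun k => (k, ((PySem.List.enumerate cl).filter (fun p => p.2.2.2 == k)).map (fun p => p.1))) := by
    apply PySem.List.sorted_eq_of_perm_of_pairwise_lt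
    · rw [hitems]
      exact (PySem.List.sorted_perm _ _ _).map _
    · rw [List.pairwise_map]
      exact PySem.List.sorted_ofList_pairwise_lt _
  rw [hsorteditems]
  -- the bucketed output loop, as a flatMap over the sorted distinct keys
  have hX1 : ∀ (L : List (Int × List Int)),
      L.foldl (fun out p => p.2.foldl (fun out id1 =>
          out ++ ((PySem.List.pyGetD courses id1 "").toList ++ (" - ").toList
                   ++ (PySem.Int.toStr p.1).toList ++ (" месяцев\n").toList)) out) []
      = L.flatMap (fun p => p.2.flatMap (fun id1 =>
          (PySem.List.pyGetD courses id1 "").toList ++ (" - ").toList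
           ++ (PySem.Int.toStr p.1).toList ++ (" месяцев\n").toList)) := by
    intro L
    rw [PySem.List.foldl_congr_mem L
          (fun out (p : Int × List Int) => p.2.foldl (fun out id1 =>
            out ++ ((PySem.List.pyGetD courses id1 "").toList ++ (" - ").toList
                     ++ (PySem.Int.toStr p.1).toList ++ (" месяцев\n").toList)) out)
          (fun out (p : Int × List Int) => out ++ p.2.flatMap (fun id1 =>
            (PySem.List.pyGetD courses id1 "").toList ++ (" - ").toList
             ++ (PySem.Int.toStr p.1).toList ++ (" месяцев\n").toList))
          []
          (fun acc p _ => PySem.List.foldl_append_eq_flatMap _ _ _)]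
    rw [PySem.List.foldl_append_eq_flatMap, List.nil_append]
  rw [hX1, List.flatMap_map]
  have hsplit : (" месяцев\n").toList = (" месяцев").toList ++ ['\n'] := rfl
  -- each bucket renders the filtered triples directly
  have hbucket : ∀ k, (((PySem.List.enumerate cl).filter (fun p => p.2.2.2 == k)).map (fun p => p.1)).flatMap
      (fun id1 => (PySem.List.pyGetD courses id1 "").toList ++ (" - ").toList
                   ++ (PySem.Int.toStr k).toList ++ (" месяцев\n").toList)
      = (cl.filter (fun t => t.2.2 == k)).flatMap
          (fun t => (t.1.toList ++ (" - ").toList ++ (PySem.Int.toStr t.2.2).toList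
                      ++ (" месяцев").toList) ++ ['\n']) := by
    intro k
    rw [List.flatMap_map]
    have hcong : ∀ p ∈ (PySem.List.enumerate cl).filter (fun p => p.2.2.2 == k),
        (PySem.List.pyGetD courses p.1 "").toList ++ (" - ").toList
          ++ (PySem.Int.toStr k).toList ++ (" месяцев\n").toList
        = p.2.1.toList ++ (" - ").toList ++ (PySem.Int.toStr p.2.2.2).toList
            ++ (" месяцев\n").toList := by
      intro p hp
      have hpk : p.2.2.2 = k := by simpa using (List.mem_filter.mp hp).2
      have hpe := (List.mem_filter.mp hp).1
      rcases (PySem.List.mem_enumerate_iff cl 0 p).mp hpe with ⟨j, hj, hpj⟩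
      have hjc : j < courses.length := by
        have hj' : j < zs.length := by rw [hcl, List.length_map] at hj; exact hj
        exact lt_of_lt_of_le hj' hlen
      have hget : PySem.List.pyGetD courses p.1 "" = p.2.1 := by
        subst hpj
        simp only [zero_add, PySem.List.pyGetD_natCast]
        rw [List.getD_eq_getElem courses "" hjc]
        simp [hcl, hzs]
      rw [hget, hpk]
    rw [List.flatMap_congr hcong]
    have : (PySem.List.enumerate cl).filter (fun p => p.2.2.2 == k)
        = (PySem.List.enumerate cl).filter (fun p => (fun (t : String × String × Int) => t.2.2 == k) p.2) := rfl
    rw [this]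
    have hsnd : ((PySem.List.enumerate cl).filter (fun p => (fun (t : String × String × Int) => t.2.2 == k) p.2)).flatMap
        (fun p => p.2.1.toList ++ (" - ").toList ++ (PySem.Int.toStr p.2.2.2).toList ++ (" месяцев\n").toList)
        = (((PySem.List.enumerate cl).filter (fun p => (fun (t : String × String × Int) => t.2.2 == k) p.2)).map (fun p => p.2)).flatMap
            (fun t => t.1.toList ++ (" - ").toList ++ (PySem.Int.toStr t.2.2).toList ++ (" месяцев\n").toList) :=
      (List.flatMap_map (f := fun (p : Int × (String × String × Int)) => p.2)
        (g := fun (t : String × String × Int) => t.1.toList ++ (" - ").toList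
          ++ (PySem.Int.toStr t.2.2).toList ++ (" месяцев\n").toList)
        ((PySem.List.enumerate cl).filter (fun p => (fun (t : String × String × Int) => t.2.2 == k) p.2))).symm
    rw [hsnd, pv_enum_filter_map_snd cl 0 (fun (t : String × String × Int) => t.2.2 == k)]
    apply List.flatMap_congr
    intro t _
    rw [hsplit]
    simp [List.append_assoc]
  rw [List.flatMap_congr (fun k _ => hbucket k)]
  rw [← List.flatMap_assoc]
  -- B's pairs are the same triples, projected
  have hpairs : zs.map (fun t => (t.2.2, t.1))
      = cl.map (fun (t : String × String × Int) => (t.2.2, t.1)) := by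
    rw [hcl, List.map_map]
    rfl
  rw [hpairs]
  -- B's stable sort, bucketed by the same sorted distinct keys
  have hkeys2 : (cl.map (fun (t : String × String × Int) => (t.2.2, t.1))).map (fun p => p.1)
      = cl.map (fun t => t.2.2) := by
    rw [List.map_map]
    rfl
  have hsortedpairs : PySem.List.sorted (cl.map (fun (t : String × String × Int) => (t.2.2, t.1)))
        (fun p => p.1) false
      = (KS.flatMap (fun k => cl.filter (fun t => t.2.2 == k))).map
          (fun (t : String × String × Int) => (t.2.2, t.1)) := by
    rw [pv_sorted_eq_flatMap_filter, PySem.List.dedup_eq_ofList, hkeys2, ← hKS]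
    rw [List.map_flatMap]
    apply List.flatMap_congr
    intro k _
    rw [List.filter_map]
    rfl
  rw [hsortedpairs, List.map_map]
  set S := KS.flatMap (fun k => cl.filter (fun t => t.2.2 == k)) with hS
  -- both sides are the same lines, concatenated with '\n' after vs between + strip
  have hlines : S.flatMap
      (fun t => (t.1.toList ++ (" - ").toList ++ (PySem.Int.toStr t.2.2).toList
                  ++ (" месяцев").toList) ++ ['\n'])
      = (S.map (fun t => t.1.toList ++ (" - ").toList ++ (PySem.Int.toStr t.2.2).toList
                  ++ (" месяцев").toList)).flatMap (fun l => l ++ ['\n']) :=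
    (List.flatMap_map (f := fun (t : String × String × Int) => t.1.toList ++ (" - ").toList
        ++ (PySem.Int.toStr t.2.2).toList ++ (" месяцев").toList)
      (g := fun l => l ++ ['\n']) S).symm
  rw [hlines]
  have hlinesB : List.map ((fun (p : Int × String) => p.2.toList ++ (" - ").toList
        ++ (PySem.Int.toStr p.1).toList ++ (" месяцев").toList)
          ∘ (fun (t : String × String × Int) => (t.2.2, t.1))) S
      = S.map (fun t => t.1.toList ++ (" - ").toList ++ (PySem.Int.toStr t.2.2).toList
                  ++ (" месяцев").toList) := rfl
  rw [hlinesB]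
  cases hLnil : S.map (fun t => t.1.toList ++ (" - ").toList ++ (PySem.Int.toStr t.2.2).toList
                  ++ (" месяцев").toList) with
  | nil => simp [PySem.Chars.join_nil]
  | cons l L' =>
      rw [pv_flatMap_newline _ (by simp), pv_strip_append_newline]
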